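-- pv_equiv track=rewrite | github.com/praneeth9666/Compiler_Consutruction_Labs | lab4-team-kash_mr-p-master/src/pyyc/interference_graph.py | gen_interference_graph
-- ===== SOURCE A (Python) =====
-- fun_registers = ["eax", "ecx", "edx"]
--
-- arith_instruct = ["addl", "negl"]
--
-- def gen_interference_graph(IR, live_list, var_lst): #Definitely working
--     graph = {}
--     for x in live_list:
--         for y in x:
--             if y not in graph.keys():
--                 graph[y] = set()
--     for x in fun_registers:
--         graph[x] = set()
--     lines = IR.split("\n")
--     for x in range(len(lines)):
--         line = lines[x]
--         instruction = line[:line.find(" ")]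
--         if instruction == "movl":
--             source = line[line.find(" ") + 1 : line.find(",")]
--             destination = line[line.find(",") + 2:]
--             for t1 in live_list[x:]:
--                 for t2 in t1:
--                     if t2 != source and t2 != destination and destination in graph:
--                         graph[destination].add(t2)
--         if instruction in arith_instruct:
--             desintation = None
--             if line.find(",") == -1:
--                 destination = line[line.find(" ") + 1 :]
--             else:
--                 destination = line[line.find(",") + 2 :]
--             for t1 in live_list[x:]:
--                 for t2 in t1:
--                     if t2 != destination:
--                         graph[destination].add(t2)
--         if instruction == "call": #For connecting caller saved registers to live variables
--             for t1 in live_list[x]: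
--                 for reg in fun_registers:
--                     graph[reg].add(t1)
--                     graph[t1].add(reg)
--     return graph
-- ===== SOURCE B (Python) =====
-- fun_registers = ["eax", "ecx", "edx"]
--
-- arith_instruct = ["addl", "negl"]
--
-- def gen_interference_graph(IR, live_list, var_lst):
--     graph = {}
--     for live in live_list:
--         for v in live:
--             if v not in graph:
--                 graph[v] = set()
--     for r in fun_registers:
--         graph[r] = set()
--     lines = IR.split("\n")
--     # suffix[i] = variables occurring in live_list[i:], in first-occurrence order
--     L = len(live_list)
--     suffix = [None] * (L + 1)
--     suffix[L] = []
--     for i in range(L - 1, -1, -1):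
--         cur = list(dict.fromkeys(live_list[i]))
--         cur_set = set(cur)
--         suffix[i] = cur + [v for v in suffix[i + 1] if v not in cur_set]
--     for x, line in enumerate(lines):
--         sp = line.find(" ")
--         instruction = line[:sp]
--         tail = suffix[min(x, L)]
--         if instruction == "movl":
--             comma = line.find(",")
--             source = line[sp + 1:comma]
--             destination = line[comma + 2:]
--             if destination in graph:
--                 graph[destination].update(v for v in tail if v != source and v != destination)
--         elif instruction in arith_instruct:
--             comma = line.find(",")
--             destination = line[sp + 1:] if comma == -1 else line[comma + 2:]
--             if destination in graph:
--                 graph[destination].update(v for v in tail if v != destination)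
--         elif instruction == "call":
--             for t1 in live_list[x]:
--                 for reg in fun_registers:
--                     graph[reg].add(t1)
--                     graph[t1].add(reg)
--     return graph
-- ===== Notes on version B (the rewrite author's own statement) =====
-- stated objective: alternative
-- what changed: Instead of rescanning the whole live-list suffix live_list[x:] for every movl/addl/negl line, B precomputes in one backward pass the deduplicated suffix-union of live sets and, for each line, unions that single list into the destination's adjacency set (guarding the arith branch by 'destination in graph', where A would raise KeyError); on inputs whose lines rarely parse as instructions A's rescans never trigger, so a timing run found no speed-up.
import Mathlib
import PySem

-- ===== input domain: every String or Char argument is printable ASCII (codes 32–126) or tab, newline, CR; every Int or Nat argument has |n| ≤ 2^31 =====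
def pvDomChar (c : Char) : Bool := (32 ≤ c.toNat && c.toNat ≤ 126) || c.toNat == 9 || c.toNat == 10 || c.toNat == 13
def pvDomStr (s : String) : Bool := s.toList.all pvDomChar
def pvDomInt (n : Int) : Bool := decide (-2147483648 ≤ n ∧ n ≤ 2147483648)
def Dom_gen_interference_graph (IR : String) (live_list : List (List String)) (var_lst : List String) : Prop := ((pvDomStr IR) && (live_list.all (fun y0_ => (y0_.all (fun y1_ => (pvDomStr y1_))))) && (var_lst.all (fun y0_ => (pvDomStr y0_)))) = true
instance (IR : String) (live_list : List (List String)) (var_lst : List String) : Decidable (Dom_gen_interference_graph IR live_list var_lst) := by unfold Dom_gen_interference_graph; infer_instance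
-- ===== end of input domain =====

-- B replaces A's rescan of live_list[x:] at every movl/addl/negl line by a suffix-union
-- table built in one backward pass, unioned into the destination's set per line
-- (a different algorithm; not measured faster on random inputs, whose lines rarely
-- parse as instructions). Both Pythons share the graph initialisation, the line
-- parsing and the 'call' branch; those are the shared helpers below.

-- ===== shared helpers (code common to Source A and Source B) =====
def pvFunRegisters : List String := ["eax", "ecx", "edx"]

def pvArithInstruct : List String := ["addl", "negl"]

def pvLines (IR : String) : List String := (PySem.Str.split? IR "\n").getD []

def pvInstrOf (line : String) : String :=
  PySem.Str.slice line none (some (PySem.Str.find line " "))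

def pvMovSrc (line : String) : String :=
  PySem.Str.slice line (some (PySem.Str.find line " " + 1)) (some (PySem.Str.find line ","))

def pvMovDst (line : String) : String :=
  PySem.Str.slice line (some (PySem.Str.find line "," + 2)) none

def pvArithDst (line : String) : String :=
  if PySem.Str.find line "," = -1 then
    PySem.Str.slice line (some (PySem.Str.find line " " + 1)) none
  else
    PySem.Str.slice line (some (PySem.Str.find line "," + 2)) none

def pvInitGraph (live_list : List (List String)) : PySem.Dict String (PySem.Set String) :=
  let g := live_list.foldl (fun g x =>
    x.foldl (fun g y => if g.contains y then g else g.insert y PySem.Set.empty) g) PySem.Dict.empty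
  pvFunRegisters.foldl (fun g x => g.insert x PySem.Set.empty) g

def pvCallStep (g : PySem.Dict String (PySem.Set String)) (t1s : List String) :
    PySem.Dict String (PySem.Set String) :=
  t1s.foldl (fun g t1 =>
    pvFunRegisters.foldl (fun g reg =>
      (g.modify reg PySem.Set.empty (fun s => s.add t1)).modify t1 PySem.Set.empty (fun s => s.add reg)) g) g

-- ===== PORT A =====
def gen_interference_graph (IR : String) (live_list : List (List String)) (var_lst : List String) : List (String × List String) :=
  let graph := pvInitGraph live_list
  let lines := pvLines IR
  let graph := (PySem.List.pyRange 0 (lines.length : Int)).foldl (fun g x =>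
    let line := PySem.List.pyGetD lines x ""
    let instruction := pvInstrOf line
    let g :=
      if instruction = "movl" then
        let source := pvMovSrc line
        let destination := pvMovDst line
        (PySem.List.slice live_list (some x) none).foldl (fun g t1 =>
          t1.foldl (fun g t2 =>
            if t2 ≠ source ∧ t2 ≠ destination ∧ g.contains destination = true then
              g.modify destination PySem.Set.empty (fun s => s.add t2)
            else g) g) g
      else g
    let g :=
      if instruction ∈ pvArithInstruct then
        let destination := pvArithDst line
        (PySem.List.slice live_list (some x) none).foldl (fun g t1 =>
          t1.foldl (fun g t2 =>
            if t2 ≠ destination then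
              g.modify destination PySem.Set.empty (fun s => s.add t2)
            else g) g) g
      else g
    if instruction = "call" then pvCallStep g (PySem.List.pyGetD live_list x []) else g) graph
  graph.items

-- ===== PORT B =====
-- suffix-union table: pvSuffixes ll index i holds the variables of ll[i:], first occurrence first
def pvSuffixes (ll : List (List String)) : List (List String) :=
  match ll with
  | [] => [[]]
  | live :: rest =>
      let s := pvSuffixes rest
      let cur := PySem.List.dedup live
      let curSet := PySem.Set.ofList cur
      (cur ++ (s.headD []).filter (fun v => !curSet.contains v)) :: s

def gen_interference_graph_alt (IR : String) (live_list : List (List String)) (var_lst : List String) : List (String × List String) :=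
  let graph := pvInitGraph live_list
  let lines := pvLines IR
  let L : Int := (live_list.length : Int)
  let suffix := pvSuffixes live_list
  let graph := (PySem.List.enumerate lines).foldl (fun g xl =>
    let x := xl.1
    let line := xl.2
    let instruction := pvInstrOf line
    let tail := PySem.List.pyGetD suffix (min x L) []
    if instruction = "movl" then
      let source := pvMovSrc line
      let destination := pvMovDst line
      if g.contains destination then
        g.modify destination PySem.Set.empty (fun s =>
          s.update (tail.filter (fun v => decide (v ≠ source ∧ v ≠ destination))))
      else g
    else if instruction ∈ pvArithInstruct then
      let destination := pvArithDst line
      if g.contains destination then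
        g.modify destination PySem.Set.empty (fun s =>
          s.update (tail.filter (fun v => decide (v ≠ destination))))
      else g
    else if instruction = "call" then pvCallStep g (PySem.List.pyGetD live_list x []) else g) graph
  graph.items

-- ===== PRECONDITION & SPEC =====
-- Pre_ excludes exactly the inputs on which A raises: an addl/negl line whose destination is
-- neither a live variable nor a register while some other variable is live at or after it
-- (KeyError), and a call line whose index is past the end of live_list (IndexError).
def Pre_gen_interference_graph (IR : String) (live_list : List (List String)) (var_lst : List String) : Prop :=
  ∀ x < (pvLines IR).length,
    (pvInstrOf ((pvLines IR).getD x "") ∈ pvArithInstruct →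
      pvArithDst ((pvLines IR).getD x "") ∈ live_list.flatten ∨
      pvArithDst ((pvLines IR).getD x "") ∈ pvFunRegisters ∨
      (live_list.drop x).flatten.filter (fun v => decide (v ≠ pvArithDst ((pvLines IR).getD x ""))) = []) ∧
    (pvInstrOf ((pvLines IR).getD x "") = "call" → x < live_list.length)
instance (IR : String) (live_list : List (List String)) (var_lst : List String) : Decidable (Pre_gen_interference_graph IR live_list var_lst) := by unfold Pre_gen_interference_graph; infer_instance

def pvWitness_gen_interference_graph : String × List (List String) × List String :=
  ("movl a, b\ncall foo", [["a"], ["a", "b"]], ["a", "b"])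

def Spec_gen_interference_graph (IR : String) (live_list : List (List String)) (var_lst : List String) (out : List (String × List String)) : Prop := out = gen_interference_graph_alt IR live_list var_lst
instance (IR : String) (live_list : List (List String)) (var_lst : List String) (out : List (String × List String)) : Decidable (Spec_gen_interference_graph IR live_list var_lst out) := by unfold Spec_gen_interference_graph; infer_instance

-- ===== CLAIM (what is proved, stated in full; the proofs are below) =====
def Claim_equal_gen_interference_graph : Prop := ∀ (IR : String) (live_list : List (List String)) (var_lst : List String), Dom_gen_interference_graph IR live_list var_lst → Pre_gen_interference_graph IR live_list var_lst → Spec_gen_interference_graph IR live_list var_lst (gen_interference_graph IR live_list var_lst)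


-- ===== LEMMAS AND PROOFS =====

-- keys of a modify on a present key are unchanged
theorem pv_keys_modify_of_mem (g : PySem.Dict String (PySem.Set String)) (k : String)
    (hm : k ∈ g.keys) (d0 : PySem.Set String) (f : PySem.Set String → PySem.Set String) :
    (g.modify k d0 f).keys = g.keys := by
  rw [PySem.Dict.keys_modify,
    PySem.Dict.keys_insert_of_contains _ _ ((PySem.Dict.contains_iff_mem_keys _ _).mpr hm)]

-- re-inserting the stored value is the identity
theorem pv_insert_getD_self (g : PySem.Dict String (PySem.Set String)) (k : String)
    (d0 : PySem.Set String) (hn : g.keys.Nodup) (hc : g.contains k = true) :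
    g.insert k (g.getD k d0) = g := by
  cases g with
  | mk items =>
    show PySem.Dict.insert ⟨items⟩ k _ = _
    rw [PySem.Dict.insert, if_pos hc]
    congr 1
    conv_rhs => rw [← List.map_id items]
    apply List.map_congr_left
    intro p hp
    by_cases hk : (p.1 == k) = true
    · simp only [hk, if_true]
      have h1 : p.1 = k := by simpa using hk
      have : (PySem.Dict.mk (κ := String) (ν := PySem.Set String) items).getD k d0 = p.2 := by
        apply PySem.Dict.getD_of_mem_items _ _ hn
        rw [← h1]; exact hp
      rw [this, ← h1]
      simp
    · simp [hk]

theorem pv_modify_modify (g : PySem.Dict String (PySem.Set String)) (k : String)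
    (d0 : PySem.Set String) (f h : PySem.Set String → PySem.Set String) :
    (g.modify k d0 f).modify k d0 h = g.modify k d0 (fun s => h (f s)) := by
  show ((g.insert k (f (g.getD k d0))).insert k
      (h ((g.insert k (f (g.getD k d0))).getD k d0))) = g.insert k (h (f (g.getD k d0)))
  rw [PySem.Dict.getD_insert_self, PySem.Dict.insert_insert_self]

-- B's update-with-a-filtered-list equals A's loop of conditional adds (movl predicate)
theorem pv_fold_modify_mov (src dst : String) :
    ∀ (l : List String) (g : PySem.Dict String (PySem.Set String)),
    g.keys.Nodup → g.contains dst = true →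
    l.foldl (fun g t2 =>
        if t2 ≠ src ∧ t2 ≠ dst then
          g.modify dst PySem.Set.empty (fun s => s.add t2)
        else g) g
      = g.modify dst PySem.Set.empty
          (fun s => s.update (l.filter (fun v => decide (v ≠ src ∧ v ≠ dst)))) := by
  intro l
  induction l with
  | nil =>
    intro g hn hc
    simp only [List.foldl_nil, List.filter_nil]
    rw [show (fun s : PySem.Set String => s.update []) = (fun s => s) from
      funext fun s => PySem.Set.update_nil s]
    exact (pv_insert_getD_self g dst PySem.Set.empty hn hc).symm
  | cons a l ih =>
    intro g hn hc
    by_cases hp : a ≠ src ∧ a ≠ dst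
    · have hmem : dst ∈ g.keys := (PySem.Dict.contains_iff_mem_keys _ _).mp hc
      have hk : (g.modify dst PySem.Set.empty (fun s => s.add a)).keys = g.keys :=
        pv_keys_modify_of_mem g dst hmem _ _
      have hn' : (g.modify dst PySem.Set.empty (fun s => s.add a)).keys.Nodup := by rw [hk]; exact hn
      have hc' : (g.modify dst PySem.Set.empty (fun s => s.add a)).contains dst = true := by
        rw [PySem.Dict.contains_iff_mem_keys, hk]; exact hmem
      simp only [List.foldl_cons, if_pos hp]
      rw [ih _ hn' hc', pv_modify_modify]
      have : List.filter (fun v => decide (v ≠ src ∧ v ≠ dst)) (a :: l)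
          = a :: List.filter (fun v => decide (v ≠ src ∧ v ≠ dst)) l := by
        rw [List.filter_cons_of_pos (by simpa using hp)]
      rw [this]
      exact congrArg _ (funext fun s => (PySem.Set.update_cons s a _).symm)
    · simp only [List.foldl_cons, if_neg hp]
      rw [ih _ hn hc,
        List.filter_cons_of_neg (p := fun v => decide (v ≠ src ∧ v ≠ dst)) (by simpa using hp)]

-- same for the arith predicate
theorem pv_fold_modify_arith (dst : String) :
    ∀ (l : List String) (g : PySem.Dict String (PySem.Set String)),
    g.keys.Nodup → g.contains dst = true →
    l.foldl (fun g t2 =>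
        if t2 ≠ dst then
          g.modify dst PySem.Set.empty (fun s => s.add t2)
        else g) g
      = g.modify dst PySem.Set.empty
          (fun s => s.update (l.filter (fun v => decide (v ≠ dst)))) := by
  intro l
  induction l with
  | nil =>
    intro g hn hc
    simp only [List.foldl_nil, List.filter_nil]
    rw [show (fun s : PySem.Set String => s.update []) = (fun s => s) from
      funext fun s => PySem.Set.update_nil s]
    exact (pv_insert_getD_self g dst PySem.Set.empty hn hc).symm
  | cons a l ih =>
    intro g hn hc
    by_cases hp : a ≠ dst
    · have hmem : dst ∈ g.keys := (PySem.Dict.contains_iff_mem_keys _ _).mp hc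
      have hk : (g.modify dst PySem.Set.empty (fun s => s.add a)).keys = g.keys :=
        pv_keys_modify_of_mem g dst hmem _ _
      have hn' : (g.modify dst PySem.Set.empty (fun s => s.add a)).keys.Nodup := by rw [hk]; exact hn
      have hc' : (g.modify dst PySem.Set.empty (fun s => s.add a)).contains dst = true := by
        rw [PySem.Dict.contains_iff_mem_keys, hk]; exact hmem
      simp only [List.foldl_cons, if_pos hp]
      rw [ih _ hn' hc', pv_modify_modify]
      rw [List.filter_cons_of_pos (by simpa using hp)]
      exact congrArg _ (funext fun s => (PySem.Set.update_cons s a _).symm)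
    · simp only [List.foldl_cons, if_neg hp]
      rw [ih _ hn hc,
        List.filter_cons_of_neg (p := fun v => decide (v ≠ dst)) (by simpa using hp)]

-- A's movl loop does nothing when the destination is not a key
theorem pv_fold_no_mod (src dst : String) :
    ∀ (l : List String) (g : PySem.Dict String (PySem.Set String)),
    g.contains dst = false →
    l.foldl (fun g t2 =>
        if t2 ≠ src ∧ t2 ≠ dst ∧ g.contains dst = true then
          g.modify dst PySem.Set.empty (fun s => s.add t2)
        else g) g = g := by
  intro l
  induction l with
  | nil => intro g _; rfl
  | cons a l ih =>
    intro g hc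
    have hneg : ¬ (a ≠ src ∧ a ≠ dst ∧ g.contains dst = true) := by
      intro h; rw [hc] at h; exact absurd h.2.2 (by simp)
    simp only [List.foldl_cons, if_neg hneg]
    exact ih g hc

-- A's arith loop does nothing when every live variable equals the destination
theorem pv_fold_all_eq (dst : String) :
    ∀ (l : List String) (g : PySem.Dict String (PySem.Set String)),
    (∀ a ∈ l, a = dst) →
    l.foldl (fun g t2 =>
        if t2 ≠ dst then
          g.modify dst PySem.Set.empty (fun s => s.add t2)
        else g) g = g := by
  intro l
  induction l with
  | nil => intro g _; rfl
  | cons a l ih =>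
    intro g h
    have hneg : ¬ (a ≠ dst) := by simp [h a (by simp)]
    simp only [List.foldl_cons, if_neg hneg]
    exact ih g (fun b hb => h b (by simp [hb]))

-- the 'destination in graph' conjunct is constant along A's movl loop
theorem pv_fold_cond_simp (src dst : String) :
    ∀ (l : List String) (g : PySem.Dict String (PySem.Set String)),
    g.contains dst = true →
    l.foldl (fun g t2 =>
        if t2 ≠ src ∧ t2 ≠ dst ∧ g.contains dst = true then
          g.modify dst PySem.Set.empty (fun s => s.add t2)
        else g) g
      = l.foldl (fun g t2 =>
        if t2 ≠ src ∧ t2 ≠ dst then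
          g.modify dst PySem.Set.empty (fun s => s.add t2)
        else g) g := by
  intro l
  induction l with
  | nil => intro g _; rfl
  | cons a l ih =>
    intro g hc
    by_cases hp : a ≠ src ∧ a ≠ dst
    · simp only [List.foldl_cons, if_pos (⟨hp.1, hp.2, hc⟩ : _ ∧ _ ∧ _), if_pos hp]
      apply ih
      rw [PySem.Dict.contains_modify]
      simp [hc]
    · have hneg : ¬ (a ≠ src ∧ a ≠ dst ∧ g.contains dst = true) := fun h => hp ⟨h.1, h.2.1⟩
      simp only [List.foldl_cons, if_neg hneg, if_neg hp]
      exact ih g hc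

-- dedup commutes with filter
theorem pv_ofList_filter (p : String → Bool) :
    ∀ (l : List String), PySem.Set.ofList (l.filter p) = (PySem.Set.ofList l).filter p := by
  intro l
  induction l with
  | nil => rfl
  | cons a l ih =>
    by_cases hp : p a = true
    · rw [List.filter_cons_of_pos hp, PySem.Set.ofList_cons, PySem.Set.ofList_cons, ih,
        List.filter_cons_of_pos hp]
      show _ = a :: List.filter p (List.filter (fun y => !y == a) (PySem.Set.ofList l))
      rw [List.filter_comm]
      rfl
    · rw [List.filter_cons_of_neg hp, PySem.Set.ofList_cons, ih,
        List.filter_cons_of_neg hp]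
      show List.filter p (PySem.Set.ofList l)
          = List.filter p (List.filter (fun y => !y == a) (PySem.Set.ofList l))
      rw [List.filter_comm]
      have : ∀ y ∈ List.filter p (PySem.Set.ofList l), (!y == a) = true := by
        intro y hy
        have hpy := List.of_mem_filter hy
        have : y ≠ a := fun h => hp (h ▸ hpy)
        simpa using this
      rw [List.filter_eq_self.mpr this]

-- updating with a list or with its dedup is the same
theorem pv_update_filter_ofList (s : PySem.Set String) (p : String → Bool) (l : List String) :
    s.update (l.filter p) = s.update ((PySem.Set.ofList l).filter p) := by
  rw [PySem.Set.update_eq_append_filter, PySem.Set.update_eq_append_filter,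
    pv_ofList_filter,
    PySem.Set.ofList_eq_self_of_nodup _ ((PySem.Set.nodup_ofList l).filter p)]

theorem pv_suffixes_headD (l : List (List String)) :
    (pvSuffixes l).headD [] = (pvSuffixes l).getD 0 [] := by
  cases l <;> rfl

-- the suffix table holds exactly the deduplicated suffix unions
theorem pv_suffixes_getD :
    ∀ (ll : List (List String)) (i : Nat),
    (pvSuffixes ll).getD i [] = PySem.Set.ofList (ll.drop i).flatten := by
  intro ll
  induction ll with
  | nil => intro i; cases i <;> rfl
  | cons live rest ih =>
    intro i
    cases i with
    | zero =>
      show PySem.List.dedup live ++ ((pvSuffixes rest).headD []).filter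
          (fun v => !(PySem.Set.ofList (PySem.List.dedup live)).contains v)
        = PySem.Set.ofList ((live :: rest).drop 0).flatten
      rw [pv_suffixes_headD, ih 0]
      show PySem.Set.ofList live ++ (PySem.Set.ofList (List.drop 0 rest).flatten).filter
          (fun v => !(PySem.Set.ofList (PySem.Set.ofList live)).contains v) = _
      rw [PySem.Set.ofList_ofList, List.drop_zero, List.drop_zero, List.flatten_cons,
        PySem.Set.ofList_append, PySem.Set.update_eq_append_filter]
    | succ i =>
      show (pvSuffixes rest).getD i [] = _
      rw [ih i]
      rfl

theorem pv_mem_keys_condInsert_fold :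
    ∀ (xs : List String) (g : PySem.Dict String (PySem.Set String)) (k : String),
    k ∈ (xs.foldl (fun g y => if g.contains y then g else g.insert y PySem.Set.empty) g).keys
      ↔ k ∈ xs ∨ k ∈ g.keys := by
  intro xs
  induction xs with
  | nil => simp
  | cons y xs ih =>
    intro g k
    rw [List.foldl_cons, ih]
    by_cases hy : g.contains y = true
    · rw [if_pos hy]
      have := (PySem.Dict.contains_iff_mem_keys g y).mp hy
      constructor
      · rintro (h | h) <;> simp [h]
      · rintro (h | h)
        · rcases List.mem_cons.mp h with h | h
          · right; rwa [h]
          · left; exact h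
        · right; exact h
    · rw [if_neg hy]
      simp only [PySem.Dict.mem_keys_insert, List.mem_cons]
      tauto

theorem pv_mem_keys_insert_fold :
    ∀ (xs : List String) (g : PySem.Dict String (PySem.Set String)) (k : String),
    k ∈ (xs.foldl (fun g x => g.insert x PySem.Set.empty) g).keys ↔ k ∈ xs ∨ k ∈ g.keys := by
  intro xs
  induction xs with
  | nil => simp
  | cons y xs ih =>
    intro g k
    rw [List.foldl_cons, ih]
    simp only [PySem.Dict.mem_keys_insert, List.mem_cons]
    tauto

theorem pv_mem_keys_init (ll : List (List String)) (k : String) :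
    k ∈ (pvInitGraph ll).keys ↔ k ∈ ll.flatten ∨ k ∈ pvFunRegisters := by
  show k ∈ (pvFunRegisters.foldl (fun (g : PySem.Dict String (PySem.Set String)) x => g.insert x PySem.Set.empty) _).keys ↔ _
  rw [pv_mem_keys_insert_fold]
  have : ∀ (ll : List (List String)) (g : PySem.Dict String (PySem.Set String)),
      k ∈ (ll.foldl (fun g x => x.foldl
        (fun g y => if g.contains y then g else g.insert y PySem.Set.empty) g) g).keys
      ↔ k ∈ ll.flatten ∨ k ∈ g.keys := by
    intro ll
    induction ll with
    | nil => simp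
    | cons live rest ih =>
      intro g
      rw [List.foldl_cons, ih, pv_mem_keys_condInsert_fold, List.flatten_cons]
      simp only [List.mem_append]
      tauto
  rw [this]
  simp only [PySem.Dict.keys_empty]
  simp only [List.not_mem_nil, or_false]
  tauto

theorem pv_nodup_keys_condInsert_fold :
    ∀ (xs : List String) (g : PySem.Dict String (PySem.Set String)),
    g.keys.Nodup →
    (xs.foldl (fun g y => if g.contains y then g else g.insert y PySem.Set.empty) g).keys.Nodup := by
  intro xs
  induction xs with
  | nil => exact fun g h => h
  | cons y xs ih =>
    intro g hn
    rw [List.foldl_cons]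
    apply ih
    by_cases hy : g.contains y = true
    · rwa [if_pos hy]
    · rw [if_neg hy]
      exact PySem.Dict.nodup_keys_insert g y _ hn

theorem pv_nodup_keys_init (ll : List (List String)) : (pvInitGraph ll).keys.Nodup := by
  show ((pvFunRegisters.foldl (fun (g : PySem.Dict String (PySem.Set String)) x => g.insert x PySem.Set.empty) _).keys).Nodup
  have base : ∀ (ll : List (List String)) (g : PySem.Dict String (PySem.Set String)),
      g.keys.Nodup →
      (ll.foldl (fun g x => x.foldl
        (fun g y => if g.contains y then g else g.insert y PySem.Set.empty) g) g).keys.Nodup := by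
    intro ll
    induction ll with
    | nil => exact fun g h => h
    | cons live rest ih =>
      intro g hn
      rw [List.foldl_cons]
      exact ih _ (pv_nodup_keys_condInsert_fold live g hn)
  have h1 := base ll PySem.Dict.empty PySem.Dict.nodup_keys_empty
  have : ∀ (xs : List String) (g : PySem.Dict String (PySem.Set String)),
      g.keys.Nodup → (xs.foldl (fun g x => g.insert x PySem.Set.empty) g).keys.Nodup := by
    intro xs
    induction xs with
    | nil => exact fun g h => h
    | cons y xs ih =>
      intro g hn
      rw [List.foldl_cons]
      exact ih _ (PySem.Dict.nodup_keys_insert g y _ hn)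
  exact this _ _ h1

theorem pv_callstep_inner_keys :
    ∀ (regs : List String) (g : PySem.Dict String (PySem.Set String)) (t1 : String),
    t1 ∈ g.keys → (∀ r ∈ regs, r ∈ g.keys) →
    (regs.foldl (fun g reg =>
      (g.modify reg PySem.Set.empty (fun s => s.add t1)).modify t1 PySem.Set.empty
        (fun s => s.add reg)) g).keys = g.keys := by
  intro regs
  induction regs with
  | nil => intro g t1 _ _; rfl
  | cons r regs ih =>
    intro g t1 ht hr
    rw [List.foldl_cons]
    have h1 : (g.modify r PySem.Set.empty (fun s => s.add t1)).keys = g.keys :=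
      pv_keys_modify_of_mem g r (hr r (by simp)) _ _
    have h2 : ((g.modify r PySem.Set.empty (fun s => s.add t1)).modify t1 PySem.Set.empty
        (fun s => s.add r)).keys = g.keys := by
      rw [pv_keys_modify_of_mem _ t1 (by rw [h1]; exact ht) _ _, h1]
    rw [ih _ t1 (by rw [h2]; exact ht) (fun x hx => by rw [h2]; exact hr x (by simp [hx])), h2]

theorem pv_callstep_keys :
    ∀ (t1s : List String) (g : PySem.Dict String (PySem.Set String)),
    (∀ t ∈ t1s, t ∈ g.keys) → (∀ r ∈ pvFunRegisters, r ∈ g.keys) →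
    (pvCallStep g t1s).keys = g.keys := by
  intro t1s
  induction t1s with
  | nil => intro g _ _; rfl
  | cons t t1s ih =>
    intro g ht hr
    show (List.foldl _ (pvFunRegisters.foldl _ g) t1s).keys = g.keys
    have h1 := pv_callstep_inner_keys pvFunRegisters g t (ht t (by simp)) hr
    have := ih (pvFunRegisters.foldl (fun g reg =>
      (g.modify reg PySem.Set.empty (fun s => s.add t)).modify t PySem.Set.empty
        (fun s => s.add reg)) g)
      (fun x hx => by rw [h1]; exact ht x (by simp [hx]))
      (fun r hrr => by rw [h1]; exact hr r hrr)
    exact this.trans h1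

theorem pv_enumerate_eq :
    ∀ (xs : List String) (k : Int),
    PySem.List.enumerate xs k
      = (List.range xs.length).map (fun (i : Nat) => (k + (i : Int), xs.getD i "")) := by
  intro xs
  induction xs with
  | nil => intro k; rfl
  | cons x xs ih =>
    intro k
    show (k, x) :: PySem.List.enumerate xs (k + 1) = _
    rw [ih (k + 1)]
    rw [show (x :: xs).length = xs.length + 1 from rfl, List.range_succ_eq_map,
      List.map_cons, List.map_map]
    simp only [List.getD_cons_zero, Function.comp_def, List.getD_cons_succ]
    congr 1
    · simp
    apply List.map_congr_left
    intro i _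
    congr 1
    push_cast
    ring

-- generic two-fold induction with an invariant
theorem pv_foldl_eq_of_step {Inv : PySem.Dict String (PySem.Set String) → Prop}
    (fA fB : PySem.Dict String (PySem.Set String) → Nat → PySem.Dict String (PySem.Set String)) :
    ∀ (l : List Nat),
    (∀ g i, i ∈ l → Inv g → fA g i = fB g i ∧ Inv (fB g i)) →
    ∀ g, Inv g → l.foldl fA g = l.foldl fB g := by
  intro l
  induction l with
  | nil => intro _ g _; rfl
  | cons i l ih =>
    intro hstep g hg
    rw [List.foldl_cons, List.foldl_cons]
    obtain ⟨he, hi⟩ := hstep g i (by simp) hg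
    rw [he]
    exact ih (fun g j hj => hstep g j (by simp [hj])) _ hi

theorem pv_drop_min (ll : List (List String)) (i : Nat) :
    ll.drop (min i ll.length) = ll.drop i := by
  rcases le_total i ll.length with h | h
  · rw [min_eq_left h]
  · rw [min_eq_right h, List.drop_length, List.drop_eq_nil_iff.mpr h]

theorem pv_main (IR : String) (live_list : List (List String)) (var_lst : List String)
    (hpre : Pre_gen_interference_graph IR live_list var_lst) :
    gen_interference_graph IR live_list var_lst
      = gen_interference_graph_alt IR live_list var_lst := by
  unfold gen_interference_graph gen_interference_graph_alt
  simp only []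
  congr 1
  rw [PySem.List.pyRange_zero_natCast, List.foldl_map, pv_enumerate_eq (pvLines IR) 0,
    List.foldl_map]
  refine pv_foldl_eq_of_step
    (Inv := fun g => g.keys = (pvInitGraph live_list).keys) _ _ _ ?_ _ rfl
  intro g i hi hg
  have hiN : i < (pvLines IR).length := List.mem_range.mp hi
  have hnd : g.keys.Nodup := by rw [hg]; exact pv_nodup_keys_init live_list
  have hpre_i := hpre i hiN
  simp only [zero_add, ← Nat.cast_min, PySem.List.pyGetD_natCast,
    PySem.List.slice_from_natCast]
  have hmemkeys : ∀ k : String, g.contains k = true ↔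
      k ∈ live_list.flatten ∨ k ∈ pvFunRegisters := by
    intro k
    rw [PySem.Dict.contains_iff_mem_keys, hg, pv_mem_keys_init]
  have htail : (pvSuffixes live_list).getD (min i live_list.length) []
      = PySem.Set.ofList (live_list.drop i).flatten := by
    rw [pv_suffixes_getD, pv_drop_min]
  by_cases hcall : pvInstrOf ((pvLines IR).getD i "") = "call"
  · have h1 : pvInstrOf ((pvLines IR).getD i "") ≠ "movl" := by rw [hcall]; decide
    have h2 : pvInstrOf ((pvLines IR).getD i "") ∉ pvArithInstruct := by rw [hcall]; decide
    simp only [if_pos hcall, if_neg h1, if_neg h2]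
    have hlt : i < live_list.length := hpre_i.2 hcall
    have hgetD : live_list.getD i [] = live_list[i] := List.getD_eq_getElem live_list [] hlt
    refine ⟨trivial, ?_⟩
    rw [pv_callstep_keys _ g ?_ ?_, hg]
    · intro t ht
      rw [← PySem.Dict.contains_iff_mem_keys, hmemkeys]
      left
      rw [hgetD] at ht
      exact List.mem_flatten.mpr ⟨live_list[i], List.getElem_mem hlt, ht⟩
    · intro r hr
      rw [← PySem.Dict.contains_iff_mem_keys, hmemkeys]
      right; exact hr
  · by_cases hmov : pvInstrOf ((pvLines IR).getD i "") = "movl"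
    · have h2 : pvInstrOf ((pvLines IR).getD i "") ∉ pvArithInstruct := by rw [hmov]; decide
      simp only [if_pos hmov, if_neg h2, if_neg hcall]
      by_cases hc : g.contains (pvMovDst ((pvLines IR).getD i "")) = true
      · rw [← List.foldl_flatten, pv_fold_cond_simp _ _ _ _ hc,
          pv_fold_modify_mov _ _ _ _ hnd hc, if_pos hc, htail]
        constructor
        · exact congrArg _ (funext fun s => pv_update_filter_ofList s _ _)
        · rw [pv_keys_modify_of_mem g _ ((PySem.Dict.contains_iff_mem_keys g _).mp hc) _ _, hg]
      · rw [← List.foldl_flatten, pv_fold_no_mod _ _ _ _ (by simpa using hc), if_neg hc]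
        exact ⟨rfl, hg⟩
    · by_cases harith : pvInstrOf ((pvLines IR).getD i "") ∈ pvArithInstruct
      · simp only [if_pos harith, if_neg hmov, if_neg hcall]
        by_cases hc : g.contains (pvArithDst ((pvLines IR).getD i "")) = true
        · rw [← List.foldl_flatten, pv_fold_modify_arith _ _ _ hnd hc, if_pos hc, htail]
          constructor
          · exact congrArg _ (funext fun s => pv_update_filter_ofList s _ _)
          · rw [pv_keys_modify_of_mem g _ ((PySem.Dict.contains_iff_mem_keys g _).mp hc) _ _, hg]
        · have hfil : (live_list.drop i).flatten.filter
              (fun v => decide (v ≠ pvArithDst ((pvLines IR).getD i ""))) = [] := by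
            rcases hpre_i.1 harith with h | h | h
            · exact absurd ((hmemkeys _).mpr (Or.inl h)) (by simpa using hc)
            · exact absurd ((hmemkeys _).mpr (Or.inr h)) (by simpa using hc)
            · exact h
          have hall : ∀ a ∈ (live_list.drop i).flatten,
              a = pvArithDst ((pvLines IR).getD i "") := by
            intro a ha
            have := List.filter_eq_nil_iff.mp hfil a ha
            simpa using this
          rw [← List.foldl_flatten, pv_fold_all_eq _ _ g hall, if_neg hc]
          exact ⟨rfl, hg⟩
      · simp only [if_neg hmov, if_neg harith, if_neg hcall]
        exact ⟨trivial, hg⟩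

-- ===== VERDICT (by name: the statement is the Claim_ definition above) =====
theorem gen_interference_graph_spec : Claim_equal_gen_interference_graph := by
  intro IR live_list var_lst _ hpre
  unfold Spec_gen_interference_graph
  exact pv_main IR live_list var_lst hpre
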